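-- pv_equiv track=rewrite | github.com/Londondannyboy/quest | article-worker/src/utils/helpers.py | extract_h2_sections
-- ===== SOURCE A (Python) =====
-- def extract_h2_sections(markdown: str) -> list[dict[str, str]]:
--     """
--     Extract H2 sections from markdown content.
--
--     Args:
--         markdown: Markdown content
--
--     Returns:
--         List of sections with title and content
--     """
--     sections = []
--     lines = markdown.split('\n')
--     current_section = None
--     current_content = []
--
--     for line in lines:
--         # Check for H2 heading
--         if line.startswith('## '):
--             # Save previous section
--             if current_section:
--                 sections.append({
--                     'title': current_section,
--                     'content': '\n'.join(current_content).strip()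
--                 })
--
--             # Start new section
--             current_section = line[3:].strip()
--             current_content = []
--         elif current_section:
--             current_content.append(line)
--
--     # Save last section
--     if current_section:
--         sections.append({
--             'title': current_section,
--             'content': '\n'.join(current_content).strip()
--         })
--
--     return sections
-- ===== SOURCE B (Python) =====
-- def extract_h2_sections(markdown: str) -> list[dict[str, str]]:
--     """Back-to-front single pass: walk the lines in reverse, accumulating
--     content lines until a '## ' header is met, then emit (skipping empty
--     titles); reverse the collected sections at the end."""
--     sections = []
--     content = []
--     for line in reversed(markdown.split('\n')):
--         if line.startswith('## '):
--             title = line[3:].strip()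
--             if title:
--                 sections.append({'title': title, 'content': '\n'.join(content[::-1]).strip()})
--             content = []
--         else:
--             content.append(line)
--     sections.reverse()
--     return sections
-- ===== Notes on version B (the rewrite author's own statement) =====
-- stated objective: alternative
-- what changed: Replaces A's forward scan carrying an Optional current-section plus content buffer and a duplicated end-of-loop flush with a single back-to-front pass over the lines that accumulates content until each header and emits sections in reverse, reversing the list at the end (no Optional state, no duplicated flush).
import Mathlib
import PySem

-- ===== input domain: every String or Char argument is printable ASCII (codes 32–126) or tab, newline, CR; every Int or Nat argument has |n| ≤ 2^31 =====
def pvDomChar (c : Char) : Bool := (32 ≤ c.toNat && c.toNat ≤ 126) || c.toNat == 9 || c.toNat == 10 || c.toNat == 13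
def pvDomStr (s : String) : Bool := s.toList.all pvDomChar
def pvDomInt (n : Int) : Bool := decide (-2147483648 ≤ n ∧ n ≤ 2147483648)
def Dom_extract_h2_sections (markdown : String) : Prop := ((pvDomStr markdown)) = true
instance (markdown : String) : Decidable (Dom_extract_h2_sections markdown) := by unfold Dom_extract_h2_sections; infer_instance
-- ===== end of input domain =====

-- B walks the lines back-to-front in one pass with a single content accumulator (no Optional section state); same return value as A.

-- shared section constructor: {'title': t, 'content': '\n'.join(cc).strip()}
def pvMkSec (t : String) (cc : List String) : List (String × String) :=
  [("title", t), ("content", PySem.Str.strip (PySem.Str.join "\n" cc))]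

-- ===== PORT A =====
-- state: (sections, current_section : Option String, current_content)
def pvStepA (st : List (List (String × String)) × Option String × List String)
    (line : String) : List (List (String × String)) × Option String × List String :=
  if PySem.Str.startswith line "## " then
    let secs := match st.2.1 with
      | some t => if t ≠ "" then st.1 ++ [pvMkSec t st.2.2] else st.1
      | none => st.1
    (secs, some (PySem.Str.strip (PySem.Str.slice line (some 3) none)), ([] : List String))
  else
    match st.2.1 with
    | some t => if t ≠ "" then (st.1, st.2.1, st.2.2 ++ [line]) else st
    | none => st

def extract_h2_sections (markdown : String) : List (List (String × String)) :=
  let lines := (PySem.Str.split? markdown "\n").getD []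
  let st := lines.foldl pvStepA ([], none, [])
  match st.2.1 with
  | some t => if t ≠ "" then st.1 ++ [pvMkSec t st.2.2] else st.1
  | none => st.1

-- ===== PORT B =====
-- state: (sections in reverse document order, content lines in reverse order)
def pvStepB (st : List (List (String × String)) × List String)
    (line : String) : List (List (String × String)) × List String :=
  if PySem.Str.startswith line "## " then
    let t := PySem.Str.strip (PySem.Str.slice line (some 3) none)
    (if t ≠ "" then st.1 ++ [pvMkSec t st.2.reverse] else st.1, ([] : List String))
  else
    (st.1, st.2 ++ [line])

def extract_h2_sections_alt (markdown : String) : List (List (String × String)) :=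
  let lines := (PySem.Str.split? markdown "\n").getD []
  let st := (lines.reverse).foldl pvStepB ([], [])
  st.1.reverse

-- ===== PRECONDITION & SPEC =====
def Spec_extract_h2_sections (markdown : String) (out : List (List (String × String))) : Prop := out = extract_h2_sections_alt markdown
instance (markdown : String) (out : List (List (String × String))) : Decidable (Spec_extract_h2_sections markdown out) := by unfold Spec_extract_h2_sections; infer_instance

-- ===== CLAIM (what is proved, stated in full; the proofs are below) =====
def Claim_equal_extract_h2_sections : Prop := ∀ (markdown : String), Dom_extract_h2_sections markdown → Spec_extract_h2_sections markdown (extract_h2_sections markdown)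

-- ===== LEMMAS AND PROOFS =====

-- what A's final 'save last section' step does to a state
def pvEmit (cs : Option String) (cc : List String) : List (List (String × String)) :=
  match cs with
  | some t => if t ≠ "" then [pvMkSec t cc] else []
  | none => []

-- sections produced by the rest of the document given A's open-section state
def pvTail (cs : Option String) (cc : List String) : List String → List (List (String × String))
  | [] => pvEmit cs cc
  | l :: ls =>
    if PySem.Str.startswith l "## " then
      pvEmit cs cc ++ pvTail (some (PySem.Str.strip (PySem.Str.slice l (some 3) none))) [] ls
    else match cs with
      | some t => if t ≠ "" then pvTail cs (cc ++ [l]) ls else pvTail cs cc ls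
      | none => pvTail cs cc ls

def pvFin (st : List (List (String × String)) × Option String × List String) :
    List (List (String × String)) := st.1 ++ pvEmit st.2.1 st.2.2

theorem pvA_char (ls : List String) :
    ∀ (secs : List (List (String × String))) (cs : Option String) (cc : List String),
    pvFin (ls.foldl pvStepA (secs, cs, cc)) = secs ++ pvTail cs cc ls := by
  induction ls with
  | nil => intro secs cs cc; cases cs <;> simp [pvFin, pvTail, pvEmit]
  | cons l ls ih =>
    intro secs cs cc
    simp only [List.foldl_cons, pvTail, pvStepA]
    by_cases hl : PySem.Str.startswith l "## " = true
    · simp only [hl, if_pos]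
      cases cs with
      | none => simp [ih, pvEmit]
      | some t =>
        by_cases ht : t = "" <;> simp [ht, ih, pvEmit]
    · simp only [hl, if_neg, Bool.false_eq_true, not_false_iff]
      cases cs with
      | none => simp [ih]
      | some t =>
        by_cases ht : t = "" <;> simp [ht, ih]

theorem pvB_char (ls : List String) :
    ∀ (cs : Option String) (cc : List String),
    pvTail cs cc ls =
      (let st := ls.foldr (fun l st => pvStepB st l) ([], []);
       pvEmit cs (cc ++ st.2.reverse) ++ st.1.reverse) := by
  induction ls with
  | nil => intro cs cc; simp [pvTail]
  | cons l ls ih =>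
    intro cs cc
    simp only [List.foldr_cons, pvTail, pvStepB]
    by_cases hl : PySem.Str.startswith l "## " = true
    · simp only [hl, if_pos]
      by_cases ht : PySem.Str.strip (PySem.Str.slice l (some 3) none) = "" <;>
        simp [ht, ih, pvEmit, pvStepB]
    · simp only [hl, if_neg, Bool.false_eq_true, not_false_iff]
      cases cs with
      | none => simp [ih, pvEmit, pvStepB]
      | some t =>
        by_cases ht : t = "" <;> simp [ht, ih, pvEmit, pvStepB]

-- A's trailing 'save last section' match IS pvFin
theorem pvMatchFin (st : List (List (String × String)) × Option String × List String) :
    (match st.2.1 with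
     | some t => if t ≠ "" then st.1 ++ [pvMkSec t st.2.2] else st.1
     | none => st.1) = pvFin st := by
  rcases st with ⟨s, cs, cc⟩
  cases cs <;> simp [pvFin, pvEmit]
  split <;> simp

-- ===== VERDICT (by name: the statement is the Claim_ definition above) =====
theorem extract_h2_sections_spec : Claim_equal_extract_h2_sections := by
  intro markdown _
  unfold Spec_extract_h2_sections extract_h2_sections extract_h2_sections_alt
  dsimp only
  rw [List.foldl_reverse, pvMatchFin, pvA_char, pvB_char]
  simp [pvEmit]
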